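-- pv_equiv track=rewrite | github.com/lfy79001/TableQAKit | TableQAKit/numerical/MRC/tag_op/tagop/modeling_tagop.py | get_continuous_tag_slots
-- ===== SOURCE A (Python) =====
-- def get_continuous_tag_slots(paragraph_token_tag_prediction):
--     tag_slots = []
--     span_start = False
--     for i in range(1, len(paragraph_token_tag_prediction)):
--         if paragraph_token_tag_prediction[i] != 0 and not span_start:
--             span_start = True
--             start_index = i
--         if paragraph_token_tag_prediction[i] == 0 and span_start:
--             span_start = False
--             tag_slots.append((start_index, i))
--     if span_start:
--         tag_slots.append((start_index, len(paragraph_token_tag_prediction)))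
--     return tag_slots
-- ===== SOURCE B (Python) =====
-- def get_continuous_tag_slots(paragraph_token_tag_prediction):
--     p = paragraph_token_tag_prediction
--     n = len(p)
--     starts = [i for i in range(1, n)
--               if p[i] != 0 and (i == 1 or p[i - 1] == 0)]
--     ends = [j for j in range(2, n)
--             if p[j] == 0 and p[j - 1] != 0]
--     if n >= 2 and p[n - 1] != 0:
--         ends.append(n)
--     return list(zip(starts, ends))
-- ===== Notes on version B (the rewrite author's own statement) =====
-- stated objective: alternative
-- what changed: Replaces A's single stateful scan (span_start flag + start_index carried through the loop) by two independent stateless boundary-detection passes -- one collecting span starts (nonzero preceded by zero or at index 1), one collecting span ends (zero preceded by nonzero, plus len for a trailing run) -- zipped together.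
import Mathlib
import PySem

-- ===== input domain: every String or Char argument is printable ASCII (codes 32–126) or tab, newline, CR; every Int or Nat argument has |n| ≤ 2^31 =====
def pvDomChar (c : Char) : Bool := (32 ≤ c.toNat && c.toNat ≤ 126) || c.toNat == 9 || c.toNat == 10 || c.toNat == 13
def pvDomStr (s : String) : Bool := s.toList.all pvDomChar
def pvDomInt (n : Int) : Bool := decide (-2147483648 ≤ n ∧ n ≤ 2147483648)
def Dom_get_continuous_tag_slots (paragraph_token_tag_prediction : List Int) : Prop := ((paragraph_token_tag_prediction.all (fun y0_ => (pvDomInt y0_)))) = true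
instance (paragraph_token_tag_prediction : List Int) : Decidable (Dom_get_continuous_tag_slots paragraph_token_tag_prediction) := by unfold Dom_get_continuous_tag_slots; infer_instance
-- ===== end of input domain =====

-- B replaces A's single stateful scan (span_start flag + carried start_index) by two
-- independent stateless boundary-detection passes (span starts; span ends) zipped together
-- (alternative decomposition; same O(n) cost).


-- ===== PORT A =====
-- one loop iteration of A (the two sequential 'if's, the second seeing the first's update)
def pvAStep (xs : List Int) (st : List (Int × Int) × Bool × Int) (i : Int) :
    List (Int × Int) × Bool × Int :=
  let v := PySem.List.pyGetD xs i 0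
  let p : Bool × Int := if v ≠ 0 ∧ st.2.1 = false then (true, i) else (st.2.1, st.2.2)
  if v = 0 ∧ p.1 = true then (st.1 ++ [(p.2, i)], false, p.2) else (st.1, p.1, p.2)

def get_continuous_tag_slots (paragraph_token_tag_prediction : List Int) : List (Int × Int) :=
  let n : Int := paragraph_token_tag_prediction.length
  -- start_index is only read after being set; 0 stands for Python's unbound initial value
  let r := (PySem.List.pyRange 1 n 1).foldl (pvAStep paragraph_token_tag_prediction) ([], false, 0)
  if r.2.1 then r.1 ++ [(r.2.2, n)] else r.1

-- ===== PORT B =====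
def get_continuous_tag_slots_alt (paragraph_token_tag_prediction : List Int) : List (Int × Int) :=
  let p := paragraph_token_tag_prediction
  let n : Int := p.length
  let starts := (PySem.List.pyRange 1 n 1).filter
    (fun i => PySem.List.pyGetD p i 0 != 0 && (i == 1 || PySem.List.pyGetD p (i-1) 0 == 0))
  let ends := ((PySem.List.pyRange 2 n 1).filter
      (fun j => PySem.List.pyGetD p j 0 == 0 && PySem.List.pyGetD p (j-1) 0 != 0))
    ++ (if 2 ≤ n && PySem.List.pyGetD p (n-1) 0 != 0 then [n] else [])
  starts.zip ends

-- ===== PRECONDITION & SPEC =====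
def Spec_get_continuous_tag_slots (paragraph_token_tag_prediction : List Int) (out : List (Int × Int)) : Prop := out = get_continuous_tag_slots_alt paragraph_token_tag_prediction
instance (paragraph_token_tag_prediction : List Int) (out : List (Int × Int)) : Decidable (Spec_get_continuous_tag_slots paragraph_token_tag_prediction out) := by unfold Spec_get_continuous_tag_slots; infer_instance

-- ===== CLAIM (what is proved, stated in full; the proofs are below) =====
def Claim_equal_get_continuous_tag_slots : Prop := ∀ (paragraph_token_tag_prediction : List Int), Dom_get_continuous_tag_slots paragraph_token_tag_prediction → Spec_get_continuous_tag_slots paragraph_token_tag_prediction (get_continuous_tag_slots paragraph_token_tag_prediction)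

-- ===== LEMMAS AND PROOFS =====

-- the start/end boundary predicates of B, without the special i==1 disjunct
def pvCondS (xs : List Int) (i : Int) : Bool :=
  PySem.List.pyGetD xs i 0 != 0 && PySem.List.pyGetD xs (i-1) 0 == 0
def pvCondE (xs : List Int) (j : Int) : Bool :=
  PySem.List.pyGetD xs j 0 == 0 && PySem.List.pyGetD xs (j-1) 0 != 0

def pvS (xs : List Int) (a n : Int) : List Int :=
  (PySem.List.pyRange a n 1).filter (pvCondS xs)
def pvE (xs : List Int) (a n : Int) : List Int :=
  (PySem.List.pyRange a n 1).filter (pvCondE xs)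
    ++ (if 2 ≤ n && PySem.List.pyGetD xs (n-1) 0 != 0 then [n] else [])

-- main invariant: A's fold from index a (2 ≤ a ≤ n), with the flag recording whether
-- x[a-1] ≠ 0, produces exactly the zip of remaining starts with remaining ends
theorem pvMain (xs : List Int) :
    ∀ (k : Nat) (a : Int) (acc : List (Int × Int)) (s : Int), 2 ≤ a →
      (let r := (PySem.List.pyRange a (a + k) 1).foldl (pvAStep xs)
          (acc, (PySem.List.pyGetD xs (a-1) 0 != 0), s);
        r.1 ++ (if r.2.1 then [(r.2.2, a + (k : Int))] else []))
      = acc ++ (if PySem.List.pyGetD xs (a-1) 0 != 0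
          then (s :: pvS xs a (a + k)).zip (pvE xs a (a + k))
          else (pvS xs a (a + k)).zip (pvE xs a (a + k))) := by
  intro k
  induction k with
  | zero =>
      intro a acc s ha
      rw [show a + ((0:Nat):Int) = a by simp]
      rw [PySem.List.pyRange_one_eq_nil (le_refl a)]
      by_cases h : PySem.List.pyGetD xs (a-1) 0 = 0
      · simp [pvS, pvE, PySem.List.pyRange_one_eq_nil (le_refl a), h]
      · simp [pvS, pvE, PySem.List.pyRange_one_eq_nil (le_refl a), h, ha]
  | succ k ih =>
      intro a acc s ha
      have hcast : a + ((k+1 : Nat) : Int) = (a+1) + (k : Int) := by push_cast; ring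
      rw [hcast, PySem.List.pyRange_one_cons (by omega : a < (a+1)+(k:Int))]
      simp only [List.foldl_cons]
      have hS : pvS xs a ((a+1)+(k:Int)) =
          (if pvCondS xs a then [a] else []) ++ pvS xs (a+1) ((a+1)+(k:Int)) := by
        unfold pvS
        rw [PySem.List.pyRange_one_cons (by omega : a < (a+1)+(k:Int))]
        by_cases h : pvCondS xs a <;> simp [h]
      have hE : pvE xs a ((a+1)+(k:Int)) =
          (if pvCondE xs a then [a] else []) ++ pvE xs (a+1) ((a+1)+(k:Int)) := by
        unfold pvE
        rw [PySem.List.pyRange_one_cons (by omega : a < (a+1)+(k:Int))]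
        by_cases h : pvCondE xs a <;> simp [h]
      by_cases hprev : PySem.List.pyGetD xs (a-1) 0 = 0 <;>
        by_cases hcur : PySem.List.pyGetD xs a 0 = 0
      · -- flag false, x[a] = 0: state unchanged, no boundary at a
        have hflag : (PySem.List.pyGetD xs (a-1) 0 != 0) = false := by simp [bne, hprev]
        rw [hflag]
        have hstep : pvAStep xs (acc, false, s) a = (acc, false, s) := by
          simp [pvAStep, hcur]
        rw [hstep]
        have := ih (a+1) acc s (by omega)
        rw [show (a+1) - 1 = a by ring] at this
        simp only [hcur, bne_self_eq_false] at this
        rw [this, hS, hE]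
        have hcS : pvCondS xs a = false := by simp [pvCondS, hcur]
        have hcE : pvCondE xs a = false := by simp [pvCondE, bne, hprev]
        simp [hcS, hcE]
      · -- flag false, x[a] ≠ 0: span starts at a
        have hflag : (PySem.List.pyGetD xs (a-1) 0 != 0) = false := by simp [bne, hprev]
        rw [hflag]
        have hstep : pvAStep xs (acc, false, s) a = (acc, true, a) := by
          simp [pvAStep, hcur]
        rw [hstep]
        have := ih (a+1) acc a (by omega)
        rw [show (a+1) - 1 = a by ring] at this
        have hb : (PySem.List.pyGetD xs a 0 != 0) = true := by simp [bne, hcur]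
        rw [hb] at this
        simp only [if_true] at this
        rw [this, hS, hE]
        have hcS : pvCondS xs a = true := by simp [pvCondS, bne, hcur, hprev]
        have hcE : pvCondE xs a = false := by simp [pvCondE, hcur]
        simp [hcS, hcE]
      · -- flag true, x[a] = 0: span (s, a) emitted
        have hflag : (PySem.List.pyGetD xs (a-1) 0 != 0) = true := by simp [bne, hprev]
        rw [hflag]
        have hstep : pvAStep xs (acc, true, s) a = (acc ++ [(s, a)], false, s) := by
          simp [pvAStep, hcur]
        rw [hstep]
        have := ih (a+1) (acc ++ [(s, a)]) s (by omega)
        rw [show (a+1) - 1 = a by ring] at this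
        simp only [hcur, bne_self_eq_false] at this
        rw [this, hS, hE]
        have hcS : pvCondS xs a = false := by simp [pvCondS, bne, hcur]
        have hcE : pvCondE xs a = true := by simp [pvCondE, bne, hcur, hprev]
        simp [hcS, hcE]
      · -- flag true, x[a] ≠ 0: span continues
        have hflag : (PySem.List.pyGetD xs (a-1) 0 != 0) = true := by simp [bne, hprev]
        rw [hflag]
        have hstep : pvAStep xs (acc, true, s) a = (acc, true, s) := by
          simp [pvAStep, hcur]
        rw [hstep]
        have := ih (a+1) acc s (by omega)
        rw [show (a+1) - 1 = a by ring] at this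
        have hb : (PySem.List.pyGetD xs a 0 != 0) = true := by simp [bne, hcur]
        rw [hb] at this
        simp only [if_true] at this
        rw [this, hS, hE]
        have hcS : pvCondS xs a = false := by simp [pvCondS, bne, hprev]
        have hcE : pvCondE xs a = false := by simp [pvCondE, hcur]
        simp [hcS, hcE]

-- B's starts-filter from index 2 on drops the dead 'i == 1' disjunct
theorem pvStarts_tail (xs : List Int) (n : Int) :
    (PySem.List.pyRange 2 n 1).filter
      (fun i => PySem.List.pyGetD xs i 0 != 0 && (i == 1 || PySem.List.pyGetD xs (i-1) 0 == 0))
    = pvS xs 2 n := by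
  unfold pvS
  apply List.filter_congr
  intro i hi
  have h2 : 2 ≤ i := (PySem.List.mem_pyRange_one.mp hi).1
  have : (i == 1) = false := by simp; omega
  simp [pvCondS, this]

-- ===== VERDICT (by name: the statement is the Claim_ definition above) =====
theorem get_continuous_tag_slots_spec : Claim_equal_get_continuous_tag_slots := by
  intro xs _
  unfold Spec_get_continuous_tag_slots get_continuous_tag_slots get_continuous_tag_slots_alt
  dsimp only
  by_cases hn : (xs.length : Int) ≤ 1
  · rw [PySem.List.pyRange_one_eq_nil hn, PySem.List.pyRange_one_eq_nil (by omega : (xs.length:Int) ≤ 2)]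
    simp
  · have h2 : (2:Int) ≤ (xs.length : Int) := by omega
    rw [PySem.List.pyRange_one_cons (by omega : (1:Int) < (xs.length:Int))]
    simp only [List.foldl_cons, List.filter_cons]
    have hsplit : ∀ (r : List (Int × Int) × Bool × Int) (x : Int × Int),
        (if r.2.1 = true then r.1 ++ [x] else r.1) = r.1 ++ (if r.2.1 = true then [x] else []) := by
      intro r x; by_cases h : r.2.1 = true <;> simp [h]
    have hone : ((1:Int) == 1 || PySem.List.pyGetD xs (1-1) 0 == 0) = true := by simp
    by_cases hc : PySem.List.pyGetD xs 1 0 = 0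
    · -- x[1] = 0: no span starts at 1
      have hstep : pvAStep xs ([], false, 0) 1 = ([], false, 0) := by
        simp [pvAStep, hc]
      rw [hstep]
      have G := pvMain xs ((xs.length : Int) - 2).toNat 2 [] 0 (le_refl 2)
      rw [show (2:Int) + (((xs.length:Int) - 2).toNat : Int) = (xs.length : Int) by omega] at G
      rw [show (2:Int) - 1 = 1 by ring] at G
      simp only [hc, bne_self_eq_false] at G
      rw [show (1:Int)+1 = (2:Int) by norm_num, hsplit, G, pvStarts_tail]
      simp [bne, hc, pvE]
      try rfl
    · -- x[1] ≠ 0: a span starts at 1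
      have hstep : pvAStep xs ([], false, 0) 1 = ([], true, 1) := by
        simp [pvAStep, hc]
      rw [hstep]
      have G := pvMain xs ((xs.length : Int) - 2).toNat 2 [] 1 (le_refl 2)
      rw [show (2:Int) + (((xs.length:Int) - 2).toNat : Int) = (xs.length : Int) by omega] at G
      rw [show (2:Int) - 1 = 1 by ring] at G
      have hb : (PySem.List.pyGetD xs 1 0 != 0) = true := by simp [bne, hc]
      rw [hb] at G
      simp only [if_true] at G
      rw [show (1:Int)+1 = (2:Int) by norm_num, hsplit, G, pvStarts_tail]
      simp [bne, hc, pvE]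
      try rfl
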